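-- pv_equiv track=rewrite | github.com/xorezombie/Urban_academy | module2hard.py | pass_2
-- ===== SOURCE A (Python) =====
-- def pass_2(number):
--     result = ''
--     param = 0
--     if number % 2 == 0:
--         param = number // 2
--     else:
--         param = number // 2 + 1
--     for i in range(1,param):
--         for j in range(2,number):
--             if number % (i+j) == 0:
--                 result += str(i)+str(j)
--     return result
-- ===== SOURCE B (Python) =====
-- def pass_2(number):
--     if number < 3:
--         return ''
--     divisors = [d for d in range(3, number + 1) if number % d == 0]
--     parts = [str(i) + str(d - i)
--              for i in range(1, (number + 1) // 2)
--              for d in divisors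
--              if d - i >= 2]
--     return ''.join(parts)
-- ===== Notes on version B (the rewrite author's own statement) =====
-- stated objective: faster
-- what changed: B precomputes the sorted list of divisors of number once and, for each i, walks only the divisors (emitting j = d - i), instead of A's inner scan of every j in range(2, number); strings are collected in a list and joined once instead of repeated concatenation.
import Mathlib
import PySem

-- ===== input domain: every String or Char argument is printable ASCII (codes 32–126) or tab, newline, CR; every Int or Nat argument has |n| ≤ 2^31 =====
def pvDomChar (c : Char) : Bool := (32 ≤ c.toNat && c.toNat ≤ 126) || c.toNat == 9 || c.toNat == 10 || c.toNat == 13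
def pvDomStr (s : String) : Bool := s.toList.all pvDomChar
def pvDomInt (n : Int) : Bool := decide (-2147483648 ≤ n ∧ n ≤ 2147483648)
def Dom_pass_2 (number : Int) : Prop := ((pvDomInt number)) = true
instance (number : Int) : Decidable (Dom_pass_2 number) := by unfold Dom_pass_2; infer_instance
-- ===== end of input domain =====

-- B replaces A's inner scan over all of range(2, number) by one precomputed sorted divisor
-- list walked per i, and joins the pieces once instead of repeated concatenation (objective: faster).

-- ===== PORT A =====
def pass_2 (number : Int) : String :=
  let param : Int :=
    if PySem.Int.mod number 2 = 0 then PySem.Int.floordiv number 2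
    else PySem.Int.floordiv number 2 + 1
  (PySem.List.pyRange 1 param 1).foldl (fun result i =>
    (PySem.List.pyRange 2 number 1).foldl (fun result j =>
      if PySem.Int.mod number (i + j) = 0 then
        result ++ (PySem.Int.toStr i ++ PySem.Int.toStr j)
      else result) result) ""

-- ===== PORT B =====
def pass_2_alt (number : Int) : String :=
  if number < 3 then "" else
    let divisors : List Int :=
      (PySem.List.pyRange 3 (number + 1) 1).filter (fun d => decide (PySem.Int.mod number d = 0))
    String.join ((PySem.List.pyRange 1 (PySem.Int.floordiv (number + 1) 2) 1).flatMap (fun i =>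
      (divisors.filter (fun d => decide (2 ≤ d - i))).map (fun d =>
        PySem.Int.toStr i ++ PySem.Int.toStr (d - i))))

-- ===== PRECONDITION & SPEC =====
def Spec_pass_2 (number : Int) (out : String) : Prop := out = pass_2_alt number
instance (number : Int) (out : String) : Decidable (Spec_pass_2 number out) := by unfold Spec_pass_2; infer_instance

-- ===== CLAIM (what is proved, stated in full; the proofs are below) =====
def Claim_equal_pass_2 : Prop := ∀ (number : Int), Dom_pass_2 number → Spec_pass_2 number (pass_2 number)

-- ===== LEMMAS AND PROOFS =====

theorem foldl_str_append (l : List String) (a b : String) :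
    l.foldl (· ++ ·) (a ++ b) = a ++ l.foldl (· ++ ·) b := by
  induction l generalizing b with
  | nil => rfl
  | cons x t ih => simp only [List.foldl_cons, String.append_assoc, ih]

theorem join_cons (a : String) (l : List String) : String.join (a :: l) = a ++ String.join l := by
  show l.foldl (· ++ ·) ("" ++ a) = a ++ String.join l
  have : ("" ++ a) = a ++ "" := by simp
  rw [this]
  exact foldl_str_append l a ""

theorem join_append (l₁ l₂ : List String) :
    String.join (l₁ ++ l₂) = String.join l₁ ++ String.join l₂ := by
  induction l₁ with
  | nil => simp [String.join]
  | cons a t ih => simp [join_cons, ih, String.append_assoc]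

theorem join_flatMap {α : Type} (l : List α) (f : α → List String) :
    String.join (l.flatMap f) = String.join (l.map (fun a => String.join (f a))) := by
  induction l with
  | nil => rfl
  | cons a t ih => simp [List.flatMap_cons, join_append, join_cons, ih]

theorem foldl_if_append (p : Int → Prop) [DecidablePred p] (g : Int → String)
    (l : List Int) (acc : String) :
    l.foldl (fun r x => if p x then r ++ g x else r) acc
      = acc ++ String.join ((l.filter (fun x => decide (p x))).map g) := by
  induction l generalizing acc with
  | nil => simp [String.join]
  | cons x t ih =>
    by_cases h : p x <;> simp [h, ih, join_cons, String.append_assoc]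

theorem foldl_append_join (h : Int → String) (l : List Int) (acc : String) :
    l.foldl (fun r x => r ++ h x) acc = acc ++ String.join (l.map h) := by
  induction l generalizing acc with
  | nil => simp [String.join]
  | cons x t ih => simp [ih, join_cons, String.append_assoc]

theorem inner_lists (number i : Int) (h3 : 3 ≤ number) (hi : 1 ≤ i) :
    (((PySem.List.pyRange 3 (number + 1) 1).filter
        (fun d => decide (PySem.Int.mod number d = 0))).filter
      (fun d => decide (2 ≤ d - i)))
    = ((PySem.List.pyRange 2 number 1).filter
        (fun j => decide (PySem.Int.mod number (i + j) = 0))).map (fun j => i + j) := by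
  have hmem : ∀ x, (x ∈ (((PySem.List.pyRange 3 (number + 1) 1).filter
        (fun d => decide (PySem.Int.mod number d = 0))).filter
      (fun d => decide (2 ≤ d - i)))) ↔ (x ∈ ((PySem.List.pyRange 2 number 1).filter
        (fun j => decide (PySem.Int.mod number (i + j) = 0))).map (fun j => i + j)) := by
    intro x
    simp only [List.mem_filter, List.mem_map, PySem.List.mem_pyRange_one, decide_eq_true_eq]
    constructor
    · rintro ⟨⟨⟨h1, h2⟩, hm⟩, hd⟩
      exact ⟨x - i, ⟨⟨by omega, by omega⟩, by rw [show i + (x - i) = x by ring]; exact hm⟩, by ring⟩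
    · rintro ⟨j, ⟨⟨hj1, hj2⟩, hm⟩, hx⟩
      subst hx
      have hle : i + j ≤ number := by
        by_contra hgt
        rw [not_le] at hgt
        rw [PySem.Int.mod_eq_emod_of_pos (by omega), Int.emod_eq_of_lt (by omega) hgt] at hm
        omega
      exact ⟨⟨⟨by omega, by omega⟩, hm⟩, by omega⟩
  have s1 : (((PySem.List.pyRange 3 (number + 1) 1).filter
        (fun d => decide (PySem.Int.mod number d = 0))).filter
      (fun d => decide (2 ≤ d - i))).Pairwise (· < ·) :=
    List.Pairwise.sublist (List.filter_sublist.trans List.filter_sublist)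
      (PySem.List.pairwise_lt_pyRange_one 3 (number + 1))
  have s2 : (((PySem.List.pyRange 2 number 1).filter
        (fun j => decide (PySem.Int.mod number (i + j) = 0))).map (fun j => i + j)).Pairwise (· < ·) := by
    rw [List.pairwise_map]
    exact (List.Pairwise.sublist List.filter_sublist
      (PySem.List.pairwise_lt_pyRange_one 2 number)).imp (by omega)
  exact List.Perm.eq_of_pairwise
    (fun a b _ _ h1 h2 => absurd h2 (not_lt.mpr (le_of_lt h1))) s1 s2
    ((List.perm_ext_iff_of_nodup (s1.imp fun h => ne_of_lt h) (s2.imp fun h => ne_of_lt h)).mpr hmem)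

theorem pass_2_eq_alt (number : Int) : pass_2 number = pass_2_alt number := by
  simp only [pass_2, pass_2_alt]
  by_cases hn : number < 3
  · rw [if_pos hn]
    have h2 : (0:Int) < 2 := by norm_num
    rw [PySem.Int.mod_eq_emod_of_pos h2, PySem.Int.floordiv_eq_ediv_of_pos h2]
    split_ifs with h
    · rw [show PySem.List.pyRange 1 (number / 2) = [] from PySem.List.pyRange_one_eq_nil (by omega)]
      rfl
    · rw [show PySem.List.pyRange 1 (number / 2 + 1) = [] from PySem.List.pyRange_one_eq_nil (by omega)]
      rfl
  · rw [if_neg hn]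
    rw [not_lt] at hn
    have h2 : (0:Int) < 2 := by norm_num
    have hparam : (if PySem.Int.mod number 2 = 0 then PySem.Int.floordiv number 2
        else PySem.Int.floordiv number 2 + 1) = PySem.Int.floordiv (number + 1) 2 := by
      rw [PySem.Int.mod_eq_emod_of_pos h2, PySem.Int.floordiv_eq_ediv_of_pos h2,
        PySem.Int.floordiv_eq_ediv_of_pos h2]
      split_ifs with h <;> omega
    rw [hparam]
    simp only [foldl_if_append]
    rw [foldl_append_join, join_flatMap]
    simp only [String.empty_append]
    congr 1
    apply List.map_congr_left
    intro i hi
    rw [PySem.List.mem_pyRange_one] at hi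
    congr 1
    rw [inner_lists number i hn hi.1, List.map_map]
    apply List.map_congr_left
    intro j _
    simp

-- ===== VERDICT (by name: the statement is the Claim_ definition above) =====
theorem pass_2_spec : Claim_equal_pass_2 := fun number _ => pass_2_eq_alt number
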